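-- pv_equiv track=rewrite | github.com/barahona-research-group/ICE-NODE | lib/ehr/_coding_scheme_icd.py | _code_ancestors_dots
-- ===== SOURCE A (Python) =====
-- from typing import Set, Dict, List, Union, Callable, Any
--
-- def _code_ancestors_dots(code: str, include_itself: bool = True) -> Set[str]:
--
--     ancestors = {code} if include_itself else set()
--     if code == 'root':
--         return ancestors
--     else:
--         ancestors.add('root')
--
--     indices = code.split('.')
--     for i in reversed(range(1, len(indices))):
--         parent = '.'.join(indices[0:i])
--         ancestors.add(parent)
--     return ancestors
-- ===== SOURCE B (Python) =====
-- def _code_ancestors_dots(code: str, include_itself: bool = True):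
--     # Single right-to-left scan over the characters: every dot position i
--     # yields the ancestor code[:i] (nearest parent first). No split/join.
--     ancestors = {code} if include_itself else set()
--     if code == 'root':
--         return ancestors
--     ancestors.add('root')
--     for i in range(len(code) - 1, -1, -1):
--         if code[i] == '.':
--             ancestors.add(code[:i])
--     return ancestors
-- ===== Notes on version B (the rewrite author's own statement) =====
-- stated objective: alternative
-- what changed: Replaces the split-then-join-per-ancestor construction with a single right-to-left character scan that adds the prefix before each separator position, with no intermediate segment list.
import Mathlib
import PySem

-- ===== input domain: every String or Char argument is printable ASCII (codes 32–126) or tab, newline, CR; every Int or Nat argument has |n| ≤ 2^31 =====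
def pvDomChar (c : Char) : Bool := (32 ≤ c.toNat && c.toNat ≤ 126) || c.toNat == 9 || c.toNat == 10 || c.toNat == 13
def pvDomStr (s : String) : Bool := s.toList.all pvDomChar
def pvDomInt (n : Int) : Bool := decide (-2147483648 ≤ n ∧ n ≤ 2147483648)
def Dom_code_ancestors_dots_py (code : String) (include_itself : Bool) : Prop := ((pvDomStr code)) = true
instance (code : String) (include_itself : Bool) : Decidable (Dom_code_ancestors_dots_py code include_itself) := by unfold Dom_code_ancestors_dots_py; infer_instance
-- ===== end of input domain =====

-- B replaces A's split-then-join-per-ancestor loop with a single right-to-left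
-- character scan adding the prefix before each separator position (objective: alternative).

-- ===== PORT A =====
-- code.split('.') with the nonempty separator '.' never raises: Python's split is
-- PySem.Chars.splitOn on the character list (= the some-branch of PySem.Str.split?).
def code_ancestors_dots_py (code : String) (include_itself : Bool) : List String :=
  let ancestors : PySem.Set String :=
    if include_itself then PySem.Set.ofList [code] else PySem.Set.empty
  if code == "root" then ancestors
  else
    let ancestors := PySem.Set.add ancestors "root"
    let indices : List String := (PySem.Chars.splitOn code.toList ['.']).map String.ofList
    ((PySem.List.pyRange 1 (indices.length : Int) 1).reverse).foldl
      (fun s i =>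
        PySem.Set.add s (PySem.Str.join "." (PySem.List.slice indices (some 0) (some i))))
      ancestors

-- ===== PORT B =====
def code_ancestors_dots_py_alt (code : String) (include_itself : Bool) : List String :=
  let ancestors : PySem.Set String :=
    if include_itself then PySem.Set.ofList [code] else PySem.Set.empty
  if code == "root" then ancestors
  else
    let ancestors := PySem.Set.add ancestors "root"
    (PySem.List.pyRange (PySem.Str.len code - 1) (-1) (-1)).foldl
      (fun s i =>
        if PySem.Str.pyGet? code i == some '.' then
          PySem.Set.add s (PySem.Str.slice code none (some i))
        else s)
      ancestors

-- ===== PRECONDITION & SPEC =====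
def Spec_code_ancestors_dots_py (code : String) (include_itself : Bool) (out : List String) : Prop := out = code_ancestors_dots_py_alt code include_itself
instance (code : String) (include_itself : Bool) (out : List String) : Decidable (Spec_code_ancestors_dots_py code include_itself out) := by unfold Spec_code_ancestors_dots_py; infer_instance

-- ===== CLAIM (what is proved, stated in full; the proofs are below) =====
def Claim_equal_code_ancestors_dots_py : Prop := ∀ (code : String) (include_itself : Bool), Dom_code_ancestors_dots_py code include_itself → Spec_code_ancestors_dots_py code include_itself (code_ancestors_dots_py code include_itself)

-- ===== LEMMAS AND PROOFS =====

-- Structural description of Python's split('.') on a character list.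
def mySplit : List Char → List (List Char)
  | [] => [[]]
  | c :: cs => if c = '.' then [] :: mySplit cs else (mySplit cs).modifyHead (c :: ·)

-- The prefixes before each dot, longest first ("nearest parent first").
def dotPrefs : List Char → List (List Char)
  | [] => []
  | c :: cs => (dotPrefs cs).map (c :: ·) ++ (if c = '.' then [[]] else [])

theorem mySplit_ne_nil (cs : List Char) : mySplit cs ≠ [] := by
  cases cs with
  | nil => simp [mySplit]
  | cons c cs =>
    simp only [mySplit]
    split
    · simp
    · cases h : mySplit cs with
      | nil => exact absurd h (mySplit_ne_nil cs)
      | cons p t => simp [List.modifyHead]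

theorem splitOn_go_eq (fuel : Nat) (l cur : List Char) (acc : List (List Char))
    (h : l.length ≤ fuel) :
    PySem.Chars.splitOn.go ['.'] fuel l cur acc
      = acc.reverse ++ (mySplit l).modifyHead (cur.reverse ++ ·) := by
  induction fuel generalizing l cur acc with
  | zero =>
    have : l = [] := List.eq_nil_of_length_eq_zero (Nat.le_zero.mp h)
    subst this
    show ((cur.reverse ++ []) :: acc).reverse = _
    simp [mySplit, List.modifyHead]
  | succ fuel ih =>
    cases l with
    | nil =>
      show (cur.reverse :: acc).reverse = _
      simp [mySplit, List.modifyHead]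
    | cons c rest =>
      have hstep : PySem.Chars.splitOn.go ['.'] (fuel+1) (c :: rest) cur acc
          = (if ['.'].isPrefixOf (c::rest) then
               PySem.Chars.splitOn.go ['.'] fuel (List.drop 1 (c::rest)) [] (cur.reverse :: acc)
             else PySem.Chars.splitOn.go ['.'] fuel rest (c :: cur) acc) := rfl
      rw [hstep]
      have hlen : rest.length ≤ fuel := by simpa using h
      by_cases hc : c = '.'
      · subst hc
        rw [if_pos (by simp [List.isPrefixOf])]
        simp only [List.drop_succ_cons, List.drop_zero]
        rw [ih rest [] _ hlen]
        simp only [mySplit, List.modifyHead, List.reverse_cons, List.append_assoc,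
          List.singleton_append]
        cases mySplit rest <;> simp
      · rw [if_neg (by simp [List.isPrefixOf]; exact fun h => hc h.symm)]
        rw [ih rest (c :: cur) acc hlen]
        simp only [mySplit, if_neg hc, List.modifyHead_modifyHead]
        cases hms : mySplit rest with
        | nil => exact absurd hms (mySplit_ne_nil rest)
        | cons p t => simp [List.modifyHead]

theorem splitOn_eq_mySplit (cs : List Char) :
    PySem.Chars.splitOn cs ['.'] = mySplit cs := by
  show PySem.Chars.splitOn.go ['.'] (cs.length + 1) cs [] [] = _
  rw [splitOn_go_eq _ _ _ _ (by omega)]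
  cases h : mySplit cs with
  | nil => exact absurd h (mySplit_ne_nil cs)
  | cons p t => simp [List.modifyHead]

theorem join_cons_ne_nil (ts : List (List Char)) (hts : ts ≠ []) :
    PySem.Chars.join ['.'] ([] :: ts) = '.' :: PySem.Chars.join ['.'] ts := by
  cases ts with
  | nil => exact absurd rfl hts
  | cons q rest => rw [PySem.Chars.join_cons_cons]; simp

theorem join_modifyHead_cons (c : Char) (ts : List (List Char)) (hts : ts ≠ []) :
    PySem.Chars.join ['.'] (ts.modifyHead (c :: ·)) = c :: PySem.Chars.join ['.'] ts := by
  cases ts with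
  | nil => exact absurd rfl hts
  | cons p rest =>
    cases rest with
    | nil => simp [List.modifyHead, PySem.Chars.join_singleton]
    | cons q rest' =>
      simp only [List.modifyHead, PySem.Chars.join_cons_cons]
      simp

theorem take_succ_modifyHead {α : Type} (f : α → α) (ps : List α) (q : Nat) :
    (ps.modifyHead f).take (q+1) = (ps.take (q+1)).modifyHead f := by
  cases ps <;> simp [List.modifyHead]

-- A's per-index joins, longest first, are exactly the dot prefixes.
theorem joins_eq_dotPrefs (cs : List Char) :
    (List.range ((mySplit cs).length - 1)).reverse.map
        (fun q => PySem.Chars.join ['.'] ((mySplit cs).take (q+1)))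
      = dotPrefs cs := by
  induction cs with
  | nil => simp [mySplit, dotPrefs]
  | cons c cs ih =>
    by_cases hc : c = '.'
    · subst hc
      simp only [mySplit, dotPrefs, List.length_cons, if_true]
      have hL : (mySplit cs).length - 1 + 1 = (mySplit cs).length := by
        have := mySplit_ne_nil cs
        have : 0 < (mySplit cs).length := List.length_pos_of_ne_nil this
        omega
      rw [show (mySplit cs).length + 1 - 1 = ((mySplit cs).length - 1) + 1 from by omega,
          List.range_succ_eq_map]
      simp only [List.reverse_cons]
      rw [List.map_append, List.map_reverse, List.map_map]
      have hmap : ∀ q ∈ List.range ((mySplit cs).length - 1),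
          (((fun q => PySem.Chars.join ['.'] (([] :: mySplit cs).take (q+1))) ∘ Nat.succ) q)
            = ((fun t => '.' :: t) ∘ (fun q => PySem.Chars.join ['.'] ((mySplit cs).take (q+1)))) q := by
        intro q hq
        simp only [Function.comp]
        rw [List.take_succ_cons, join_cons_ne_nil]
        simp [List.take_eq_nil_iff, mySplit_ne_nil cs]
      rw [List.map_congr_left hmap, ← ih]
      simp only [List.map_map, List.map_reverse]
      congr 1
    · simp only [mySplit, dotPrefs, if_neg hc, List.append_nil]
      rw [List.length_modifyHead, ← ih]
      simp only [List.map_reverse, List.map_map]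
      congr 1
      apply List.map_congr_left
      intro q hq
      simp only [Function.comp]
      rw [take_succ_modifyHead, join_modifyHead_cons]
      simp [List.take_eq_nil_iff, mySplit_ne_nil cs]

-- B's scanned prefixes, positions descending, are exactly the dot prefixes.
theorem scan_eq_dotPrefs (cs : List Char) :
    ((List.range cs.length).reverse.filter (fun p => cs[p]? == some '.')).map
        (fun p => cs.take p)
      = dotPrefs cs := by
  induction cs with
  | nil => simp [dotPrefs]
  | cons c cs ih =>
    simp only [List.length_cons, dotPrefs]
    rw [List.range_succ_eq_map, ← ih]
    simp only [List.reverse_cons, List.filter_append, List.map_append,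
      List.getElem?_cons_zero, List.filter_cons, List.filter_nil]
    congr 1
    · rw [← List.map_reverse, List.filter_map, List.map_map]
      simp only [Function.comp_def, List.getElem?_cons_succ, List.take_succ_cons,
        List.map_map]
    · by_cases hc : c = '.' <;> simp [hc]

theorem pyRange_up (n : Nat) :
    PySem.List.pyRange 1 (n : Int) 1 = (List.range (n-1)).map (fun q : Nat => ((q:Int) + 1)) := by
  unfold PySem.List.pyRange
  rw [if_neg (by norm_num)]
  by_cases h : (1:Int) < (n:Int)
  · rw [if_pos (by norm_num), if_pos h]
    have h1 : ((n:Int) - 1 + 1 - 1) / 1 = (n:Int) - 1 := by omega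
    have h2 : ((n:Int) - 1).toNat = n - 1 := by omega
    rw [h1, h2]
    show List.map (fun k : Nat => 1 + 1 * (k:Int)) (List.range (n-1)) = _
    apply List.map_congr_left
    intro k _
    ring
  · rw [if_pos (by norm_num), if_neg h]
    have : n - 1 = 0 := by omega
    simp [this]

theorem range_reverse_cast (n : Nat) :
    (List.range n).reverse.map (fun p : Nat => (p : Int))
      = (List.range n).map (fun k : Nat => (n:Int) - 1 - (k:Int)) := by
  rw [List.range_eq_range', List.reverse_range', List.map_map, ← List.range_eq_range']
  apply List.map_congr_left
  intro k hk
  have : k < n := List.mem_range.mp hk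
  simp only [Function.comp_def]
  omega

theorem pyRange_down (n : Nat) :
    PySem.List.pyRange ((n : Int) - 1) (-1) (-1)
      = (List.range n).reverse.map (fun p : Nat => (p : Int)) := by
  unfold PySem.List.pyRange
  rw [if_neg (by norm_num), if_neg (by norm_num)]
  rw [range_reverse_cast]
  by_cases h : (-1:Int) < (n:Int) - 1
  · rw [if_pos h]
    have h1 : ((n:Int) - 1 - -1 + -(-1) - 1) / -(-1) = (n:Int) := by norm_num
    have h2 : ((n:Int)).toNat = n := by omega
    rw [h1, h2]
    show List.map (fun k : Nat => ((n:Int) - 1) + (-1) * (k:Int)) (List.range n) = _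
    apply List.map_congr_left
    intro k _
    ring
  · rw [if_neg h]
    have : n = 0 := by omega
    simp [this]

theorem ofList_join_take (ts : List (List Char)) (m : Nat) :
    PySem.Str.join "." ((ts.map String.ofList).take m)
      = String.ofList (PySem.Chars.join ['.'] (ts.take m)) := by
  rw [← String.toList_inj]
  rw [PySem.Str.toList_join]
  simp [List.map_take, List.map_map, Function.comp_def]

theorem str_slice_take (code : String) (p : Nat) :
    PySem.Str.slice code none (some (p : Int)) = String.ofList (code.toList.take p) := by
  rw [← String.toList_inj, PySem.Str.toList_slice, PySem.Chars.slice_eq_listSlice,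
    PySem.List.slice_to_natCast]
  simp

theorem foldl_set_eq (l : List Nat) (F : Nat → String) (G : Nat → List Char)
    (anc : PySem.Set String) (h : ∀ q ∈ l, F q = String.ofList (G q)) :
    l.foldl (fun (s : PySem.Set String) (q : Nat) => PySem.Set.add s (F q)) anc
      = ((l.map G).map String.ofList).foldl PySem.Set.add anc := by
  induction l generalizing anc with
  | nil => rfl
  | cons q t ih =>
    simp only [List.foldl_cons, List.map_cons]
    rw [h q (by simp), ih _ (fun x hx => h x (by simp [hx]))]

theorem foldA_eq (code : String) (anc : PySem.Set String) :
    ((PySem.List.pyRange 1 ((((PySem.Chars.splitOn code.toList ['.']).map String.ofList).length : Nat) : Int) 1).reverse).foldl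
        (fun s i => PySem.Set.add s (PySem.Str.join "."
          (PySem.List.slice ((PySem.Chars.splitOn code.toList ['.']).map String.ofList) (some 0) (some i)))) anc
      = ((dotPrefs code.toList).map String.ofList).foldl PySem.Set.add anc := by
  rw [splitOn_eq_mySplit, List.length_map, pyRange_up, ← List.map_reverse, List.foldl_map]
  rw [foldl_set_eq _ _ (fun q => PySem.Chars.join ['.'] ((mySplit code.toList).take (q+1))) anc ?_]
  · rw [joins_eq_dotPrefs]
  · intro q _
    have hslice : PySem.List.slice ((mySplit code.toList).map String.ofList) (some 0) (some ((q:Int) + 1))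
        = ((mySplit code.toList).map String.ofList).take (q+1) := by
      have hcast : ((q:Int) + 1) = (((q+1 : Nat)) : Int) := by push_cast; ring
      rw [hcast, show (0:Int) = ((0:Nat):Int) from rfl, PySem.List.slice_natCast]
      simp
    rw [hslice, ofList_join_take]

theorem foldB_eq (code : String) (anc : PySem.Set String) :
    (PySem.List.pyRange (PySem.Str.len code - 1) (-1) (-1)).foldl
        (fun s i => if PySem.Str.pyGet? code i == some '.' then
            PySem.Set.add s (PySem.Str.slice code none (some i)) else s) anc
      = ((dotPrefs code.toList).map String.ofList).foldl PySem.Set.add anc := by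
  rw [show PySem.Str.len code = ((code.toList.length : Nat) : Int) from rfl]
  rw [pyRange_down, List.foldl_map]
  have hcong : ((List.range code.toList.length).reverse).foldl
      (fun (s : PySem.Set String) (p : Nat) =>
        if PySem.Str.pyGet? code (p : Int) == some '.' then
          PySem.Set.add s (PySem.Str.slice code none (some (p : Int))) else s) anc
      = ((List.range code.toList.length).reverse).foldl
      (fun (s : PySem.Set String) (p : Nat) =>
        if (code.toList[p]? == some '.') = true then
          PySem.Set.add s (PySem.Str.slice code none (some (p : Int))) else s) anc := by
    apply PySem.List.foldl_congr_mem
    intro acc p _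
    rw [PySem.Str.pyGet?_natCast]
  rw [hcong, PySem.List.foldl_if_eq_foldl_filter]
  rw [foldl_set_eq _ _ (fun p => code.toList.take p) anc ?_]
  · rw [scan_eq_dotPrefs]
  · intro p _
    exact str_slice_take code p

-- ===== VERDICT (by name: the statement is the Claim_ definition above) =====
theorem code_ancestors_dots_py_spec : Claim_equal_code_ancestors_dots_py := by
  intro code include_itself _
  unfold Spec_code_ancestors_dots_py
  unfold code_ancestors_dots_py code_ancestors_dots_py_alt
  by_cases hroot : (code == "root") = true
  · simp only [hroot, if_true]
  · simp only [hroot, if_false, Bool.false_eq_true]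
    rw [foldA_eq, foldB_eq]
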